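-- pv_equiv track=rewrite | github.com/DavidSegalle/Cryptography-Algorithms | VigenereCipher/kasiski.py | probableKeys
-- ===== SOURCE A (Python) =====
-- common_letter = " eta"
--
-- def findKeys(text):
--
--     common_text = [0] * 255
--     for letter in text:
--         common_text[ord(letter)] += 1
--
--     largest_pos = 0
--     for i in range(len(common_text)):
--         if common_text[i] >= common_text[largest_pos]:
--             largest_pos = i
--
--     keys = []
--     for i in common_letter:
--         keys.append(largest_pos - ord(i))
--
--     return keys
--
-- def probableKeys(text, length):
--
--     divided_text = [""] * length
--     i = 0
--     while i < length:
--         position = i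
--         while position < len(text):
--             a = text[position]
--             divided_text[i] += a
--             position += length
--         i += 1
--
--     keys = []
--     for i in divided_text:
--         keys.append(findKeys(i))
--
--     return keys
-- ===== SOURCE B (Python) =====
-- common_letter = " eta"
--
-- def probableKeys(text, length):
--     if length <= 0:
--         return []
--     freq = [[0] * 255 for _ in range(length)]
--     for pos, ch in enumerate(text):
--         freq[pos % length][ord(ch)] += 1
--     offsets = [ord(c) for c in common_letter]
--     keys = []
--     for row in freq:
--         largest = 0
--         for i in range(255):
--             if row[i] >= row[largest]:
--                 largest = i
--         keys.append([largest - o for o in offsets])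
--     return keys
-- ===== Notes on version B (the rewrite author's own statement) =====
-- stated objective: simpler
-- what changed: B drops the intermediate coset strings entirely: instead of A's stride-indexed while loops that build one string per coset and then count each string separately, B makes a single sequential pass over the text filling a 2D frequency table indexed by pos % length, then runs the same >=-argmax per row.
import Mathlib
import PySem

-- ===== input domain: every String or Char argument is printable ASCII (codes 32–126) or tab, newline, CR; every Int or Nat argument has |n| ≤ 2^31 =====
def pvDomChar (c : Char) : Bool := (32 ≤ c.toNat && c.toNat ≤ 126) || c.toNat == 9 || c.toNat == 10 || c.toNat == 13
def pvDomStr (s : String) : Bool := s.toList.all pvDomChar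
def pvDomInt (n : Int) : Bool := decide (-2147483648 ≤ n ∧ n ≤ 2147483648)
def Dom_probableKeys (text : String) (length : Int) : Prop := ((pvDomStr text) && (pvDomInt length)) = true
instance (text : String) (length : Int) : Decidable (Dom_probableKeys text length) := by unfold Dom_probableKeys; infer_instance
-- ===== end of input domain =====

-- B replaces A's stride-built coset strings with one modulo-indexed pass that fills a 2D
-- frequency table directly (objective: simpler decomposition, same asymptotic cost).

-- ===== PORT A =====
-- inner `while position < len(text)` loop of probableKeys: chars at positions pos, pos+len, ...
-- (called only with 0 < len, which gives termination)
def pvCosetLoop (cs : List Char) (len : Nat) (hlen : 0 < len) (pos : Nat) : List Char :=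
  if h : pos < cs.length then cs[pos] :: pvCosetLoop cs len hlen (pos + len) else []
  termination_by cs.length - pos
  decreasing_by omega

-- findKeys, transliterated.  `common_text[ord(letter)] += 1` is exact for ord < 255 (Dom
-- guarantees ord ≤ 126); List.set out of range is a no-op, which is only reached outside Dom.
def pvFindKeys (s : List Char) : List Int :=
  let common_text :=
    s.foldl (fun t c => t.set c.toNat (t.getD c.toNat 0 + 1)) (List.replicate 255 (0 : Int))
  let largest_pos :=
    (List.range 255).foldl
      (fun lp i => if common_text.getD i 0 ≥ common_text.getD lp 0 then i else lp) 0
  (" eta".toList).map (fun c => (largest_pos : Int) - (c.toNat : Int))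

def probableKeys (text : String) (length : Int) : List (List Int) :=
  if h : 0 < length.toNat then
    -- divided_text built coset by coset (outer while), then findKeys applied to each
    (List.range length.toNat).map (fun i => pvFindKeys (pvCosetLoop text.toList length.toNat h i))
  else []

-- ===== PORT B =====
-- the single `for pos, ch in enumerate(text)` pass filling freq[pos % length][ord(ch)] += 1
def pvFill (n : Nat) : List Char → Nat → List (List Int) → List (List Int)
  | [], _, f => f
  | c :: rest, pos, f =>
      pvFill n rest (pos + 1) (f.modify (pos % n) (fun row => row.set c.toNat (row.getD c.toNat 0 + 1)))

-- per-row argmax (Python's `>=` loop over range(255)) and key offsets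
def pvRowKeys (row : List Int) : List Int :=
  let largest :=
    (List.range 255).foldl (fun lp i => if row.getD i 0 ≥ row.getD lp 0 then i else lp) 0
  (" eta".toList).map (fun c => (largest : Int) - (c.toNat : Int))

def probableKeys_alt (text : String) (length : Int) : List (List Int) :=
  if length ≤ 0 then []
  else
    (pvFill length.toNat text.toList 0
        (List.replicate length.toNat (List.replicate 255 (0 : Int)))).map pvRowKeys

-- ===== PRECONDITION & SPEC =====
def Spec_probableKeys (text : String) (length : Int) (out : List (List Int)) : Prop := out = probableKeys_alt text length
instance (text : String) (length : Int) (out : List (List Int)) : Decidable (Spec_probableKeys text length out) := by unfold Spec_probableKeys; infer_instance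

-- ===== CLAIM (what is proved, stated in full; the proofs are below) =====
def Claim_equal_probableKeys : Prop := ∀ (text : String) (length : Int), Dom_probableKeys text length → Spec_probableKeys text length (probableKeys text length)

-- ===== LEMMAS AND PROOFS =====

-- the table-update step shared by both frequency counts
def tstep (t : List Int) (c : Char) : List Int := t.set c.toNat (t.getD c.toNat 0 + 1)

theorem findKeys_eq_rowKeys (s : List Char) :
    pvFindKeys s = pvRowKeys (s.foldl tstep (List.replicate 255 (0 : Int))) := rfl

-- every n-th element of a list (head, then skip n-1, ...)
def evN (n : Nat) : List Char → List Char
  | [] => []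
  | c :: rest => c :: evN n (rest.drop (n - 1))
  termination_by l => l.length
  decreasing_by simp only [List.length_drop, List.length_cons]; omega

-- the elements of cs whose absolute position (counting from k) is ≡ i (mod n)
def selMod (n i : Nat) : Nat → List Char → List Char
  | _, [] => []
  | k, c :: rest => if k % n = i then c :: selMod n i (k + 1) rest else selMod n i (k + 1) rest

theorem evN_nil (n : Nat) : evN n [] = [] := by rw [evN.eq_def]

theorem evN_cons (n : Nat) (c : Char) (rest : List Char) :
    evN n (c :: rest) = c :: evN n (rest.drop (n - 1)) := by rw [evN.eq_def]

theorem cosetLoop_eq_evN (cs : List Char) (n : Nat) (h : 0 < n) (pos : Nat) :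
    pvCosetLoop cs n h pos = evN n (cs.drop pos) := by
  fun_induction pvCosetLoop cs n h pos with
  | case1 pos hlt ih =>
      rw [List.drop_eq_getElem_cons hlt, evN_cons, List.drop_drop]
      have h3 : pos + 1 + (n - 1) = pos + n := by omega
      rw [h3, ih]
  | case2 pos hge =>
      have : cs.drop pos = [] := List.drop_eq_nil_of_le (by omega)
      rw [this, evN_nil]

theorem succ_mod (k n : Nat) : (k + 1) % n = (k % n + 1) % n := by
  conv_lhs => rw [← Nat.div_add_mod k n]
  rw [Nat.add_assoc, Nat.add_comm (n * (k / n)), Nat.mul_comm, Nat.add_mul_mod_self_right]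

theorem dd_val (n i r : Nat) (hi : i < n) (hr : r < n) :
    (i + n - r) % n = if r ≤ i then i - r else n - (r - i) := by
  split
  · have h1 : i + n - r = n + (i - r) := by omega
    rw [h1, Nat.add_mod_left, Nat.mod_eq_of_lt (by omega)]
  · have h1 : i + n - r = n - (r - i) := by omega
    rw [h1]
    exact Nat.mod_eq_of_lt (by omega)

theorem arith_eq (n i : Nat) (hi : i < n) :
    (i + n - i) % n = 0 ∧ (i + n - (i + 1) % n) % n = n - 1 := by
  constructor
  · have h1 : i + n - i = n := by omega
    rw [h1, Nat.mod_self]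
  · rcases Nat.lt_or_ge (i + 1) n with h | h
    · rw [Nat.mod_eq_of_lt h]
      have h2 : i + n - (i + 1) = n - 1 := by omega
      rw [h2]
      exact Nat.mod_eq_of_lt (by omega)
    · have hin : i + 1 = n := by omega
      rw [hin, Nat.mod_self, Nat.sub_zero, Nat.add_mod_right, Nat.mod_eq_of_lt hi]
      omega

theorem arith_ne (n i r : Nat) (hi : i < n) (hr : r < n) (hne : r ≠ i) :
    1 ≤ (i + n - r) % n ∧ (i + n - (r + 1) % n) % n = (i + n - r) % n - 1 := by
  rw [dd_val n i r hi hr]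
  rcases Nat.lt_or_ge (r + 1) n with h | h
  · rw [Nat.mod_eq_of_lt h, dd_val n i (r + 1) hi h]
    split_ifs <;> omega
  · have hrn : r + 1 = n := by omega
    rw [hrn, Nat.mod_self, Nat.sub_zero, Nat.add_mod_right, Nat.mod_eq_of_lt hi]
    split_ifs <;> omega

theorem selMod_eq_evN (n i : Nat) (hi : i < n) (cs : List Char) (k : Nat) :
    selMod n i k cs = evN n (cs.drop ((i + n - k % n) % n)) := by
  induction cs generalizing k with
  | nil => simp [selMod, evN_nil]
  | cons c rest ih =>
      have hr : k % n < n := Nat.mod_lt _ (by omega)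
      have hsucc : (k + 1) % n = (k % n + 1) % n := succ_mod k n
      rw [selMod]
      split
      · rename_i hk
        obtain ⟨h0, h1⟩ := arith_eq n i hi
        rw [hk, h0, List.drop_zero, evN_cons, ih (k + 1), hsucc, hk, h1]
      · rename_i hk
        obtain ⟨h1, h2⟩ := arith_ne n i (k % n) hi hr hk
        rw [ih (k + 1), hsucc, h2]
        have hd : (i + n - k % n) % n = ((i + n - k % n) % n - 1) + 1 := by omega
        conv_rhs => rw [hd]
        rw [List.drop_succ_cons]

theorem fill_length (n : Nat) (cs : List Char) :
    ∀ (k : Nat) (f : List (List Int)), (pvFill n cs k f).length = f.length := by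
  induction cs with
  | nil => intro k f; rw [pvFill]
  | cons c rest ih => intro k f; rw [pvFill, ih, List.length_modify]

theorem fill_getD (n : Nat) (cs : List Char) :
    ∀ (k : Nat) (f : List (List Int)), f.length = n → ∀ i, i < n →
      (pvFill n cs k f).getD i [] = (selMod n i k cs).foldl tstep (f.getD i []) := by
  induction cs with
  | nil => intro k f hf i hi; rw [pvFill, selMod]; rfl
  | cons c rest ih =>
      intro k f hf i hi
      rw [pvFill, selMod]
      have hlen : (f.modify (k % n) (fun row => row.set c.toNat (row.getD c.toNat 0 + 1))).length = n := by
        rw [List.length_modify]; exact hf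
      rw [ih (k + 1) _ hlen i hi]
      have hfi : f[i]? = some (f.getD i []) := by
        rw [List.getD_eq_getElem?_getD]
        rw [List.getElem?_eq_getElem (by omega)]
        rfl
      split
      · rename_i hk
        have hmod : (f.modify (k % n) (fun row => row.set c.toNat (row.getD c.toNat 0 + 1))).getD i []
            = tstep (f.getD i []) c := by
          rw [List.getD_eq_getElem?_getD, List.getElem?_modify, hk, hfi]
          simp [tstep]
        rw [hmod, List.foldl_cons]
      · rename_i hk
        have hmod : (f.modify (k % n) (fun row => row.set c.toNat (row.getD c.toNat 0 + 1))).getD i []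
            = f.getD i [] := by
          rw [List.getD_eq_getElem?_getD, List.getElem?_modify, hfi]
          simp [hk]
        rw [hmod]

-- ===== VERDICT (by name: the statement is the Claim_ definition above) =====
theorem probableKeys_spec : Claim_equal_probableKeys := by
  intro text length _dom
  unfold Spec_probableKeys probableKeys probableKeys_alt
  by_cases hle : length ≤ 0
  · have hn0 : length.toNat = 0 := by omega
    rw [dif_neg (by omega), if_pos hle]
  · have hn : 0 < length.toNat := by omega
    rw [dif_pos hn, if_neg hle]
    set n := length.toNat with hndef
    set cs := text.toList with hcs
    have hflen : (pvFill n cs 0 (List.replicate n (List.replicate 255 (0 : Int)))).length = n := by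
      rw [fill_length, List.length_replicate]
    apply List.ext_getElem
    · rw [List.length_map, List.length_map, List.length_range, hflen]
    · intro i hi1 hi2
      have hin : i < n := by
        rw [List.length_map, List.length_range] at hi1
        exact hi1
      rw [List.getElem_map, List.getElem_map, List.getElem_range]
      rw [findKeys_eq_rowKeys, cosetLoop_eq_evN]
      have hB : (pvFill n cs 0 (List.replicate n (List.replicate 255 (0 : Int))))[i]
          = (selMod n i 0 cs).foldl tstep (List.replicate 255 (0 : Int)) := by
        rw [← List.getD_eq_getElem _ [] (by omega)]
        rw [fill_getD n cs 0 _ (by rw [List.length_replicate]) i hin]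
        congr 1
        rw [List.getD_eq_getElem _ [] (by rw [List.length_replicate]; exact hin)]
        exact List.getElem_replicate ..
      rw [hB]
      have hsel : selMod n i 0 cs = evN n (cs.drop i) := by
        rw [selMod_eq_evN n i hin cs 0]
        congr 2
        rw [Nat.zero_mod, Nat.sub_zero, Nat.add_mod_right, Nat.mod_eq_of_lt hin]
      rw [hsel]
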